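-- pv_equiv track=rewrite | github.com/AbdulRahmanShihabuddin/truck | backend/api/services/trip_planner.py | _build_review_checks
-- ===== SOURCE A (Python) =====
-- def _build_review_checks(schedule):
--     has_restart = any("cycle_restart" in segment.get("rule_tags", []) for segment in schedule)
--     has_breaks = any("break" in segment.get("rule_tags", []) for segment in schedule)
--     fuel_stops = [segment for segment in schedule if "fuel" in segment.get("rule_tags", [])]
--
--     return [
--         {
--             "label": "Hours of Service Integrity",
--             "status": "pass",
--             "detail": "Schedule is generated within the v1 property-carrying HOS assumptions.",
--         },
--         {
--             "label": "Required Breaks",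
--             "status": "pass",
--             "detail": "30-minute non-driving periods are inserted after cumulative driving limits.",
--         },
--         {
--             "label": "Fuel Cadence",
--             "status": "pass",
--             "detail": f"{len(fuel_stops)} fuel stop(s) inserted with a 1,000-mile maximum interval.",
--         },
--         {
--             "label": "Cycle Availability",
--             "status": "pass",
--             "detail": "34-hour restart inserted." if has_restart else "No cycle restart required.",
--         },
--         {
--             "label": "Break Source",
--             "status": "pass" if has_breaks else "info",
--             "detail": "Breaks may be off-duty or on-duty not driving under the v1 assumptions.",
--         },
--     ]
-- ===== SOURCE B (Python) =====
-- def _build_review_checks(schedule):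
--     # Tally, per tag of interest, how many segments carry it, then render the fixed
--     # checklist from the tally via a row constructor.
--     counts = {"cycle_restart": 0, "break": 0, "fuel": 0}
--     for segment in schedule:
--         tags = segment.get("rule_tags", [])
--         for key in counts:
--             if key in tags:
--                 counts[key] += 1
--
--     def check(label, status, detail):
--         return {"label": label, "status": status, "detail": detail}
--
--     return [
--         check("Hours of Service Integrity", "pass",
--               "Schedule is generated within the v1 property-carrying HOS assumptions."),
--         check("Required Breaks", "pass",
--               "30-minute non-driving periods are inserted after cumulative driving limits."),
--         check("Fuel Cadence", "pass",
--               f"{counts['fuel']} fuel stop(s) inserted with a 1,000-mile maximum interval."),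
--         check("Cycle Availability", "pass",
--               "34-hour restart inserted." if counts["cycle_restart"] else "No cycle restart required."),
--         check("Break Source", "pass" if counts["break"] else "info",
--               "Breaks may be off-duty or on-duty not driving under the v1 assumptions."),
--     ]
-- ===== Notes on version B (the rewrite author's own statement) =====
-- stated objective: alternative
-- what changed: Replaces the two any() scans and the filter comprehension plus three inline dict literals with a per-tag count tally (a dict {tag: segments-carrying-it} filled in one loop) from which the checklist is rendered through a row-constructor helper, deriving the booleans as count != 0.
import Mathlib
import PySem

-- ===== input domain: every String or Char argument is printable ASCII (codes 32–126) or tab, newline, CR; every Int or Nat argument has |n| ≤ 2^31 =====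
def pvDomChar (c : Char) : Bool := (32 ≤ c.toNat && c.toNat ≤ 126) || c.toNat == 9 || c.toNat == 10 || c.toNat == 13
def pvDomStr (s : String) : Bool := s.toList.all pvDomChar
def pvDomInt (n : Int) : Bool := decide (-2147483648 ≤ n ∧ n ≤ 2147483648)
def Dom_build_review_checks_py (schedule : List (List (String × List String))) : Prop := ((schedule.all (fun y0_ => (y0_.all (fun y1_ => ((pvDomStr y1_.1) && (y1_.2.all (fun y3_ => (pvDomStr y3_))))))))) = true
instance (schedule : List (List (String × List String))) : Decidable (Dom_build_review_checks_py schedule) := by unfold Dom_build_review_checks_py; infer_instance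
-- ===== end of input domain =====

-- B replaces A's three scans (two any() and a filter) and inline dict literals by a per-tag
-- tally dict filled in one loop plus a row-constructor helper; same return value (objective: alternative).


-- segment.get("rule_tags", []) on the association-list encoding of the dict (first match, default [])
def pvGetTags (seg : List (String × List String)) : List String :=
  match seg.find? (fun p => p.1 == "rule_tags") with
  | some p => p.2
  | none => []

-- ===== PORT A =====
def build_review_checks_py (schedule : List (List (String × List String))) : List (List (String × String)) :=
  let has_restart := schedule.any (fun seg => (pvGetTags seg).contains "cycle_restart")
  let has_breaks := schedule.any (fun seg => (pvGetTags seg).contains "break")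
  let fuel_stops := schedule.filter (fun seg => (pvGetTags seg).contains "fuel")
  [ [("label", "Hours of Service Integrity"), ("status", "pass"),
     ("detail", "Schedule is generated within the v1 property-carrying HOS assumptions.")],
    [("label", "Required Breaks"), ("status", "pass"),
     ("detail", "30-minute non-driving periods are inserted after cumulative driving limits.")],
    [("label", "Fuel Cadence"), ("status", "pass"),
     ("detail", PySem.Int.toStr (fuel_stops.length : Int) ++ " fuel stop(s) inserted with a 1,000-mile maximum interval.")],
    [("label", "Cycle Availability"), ("status", "pass"),
     ("detail", if has_restart then "34-hour restart inserted." else "No cycle restart required.")],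
    [("label", "Break Source"), ("status", if has_breaks then "pass" else "info"),
     ("detail", "Breaks may be off-duty or on-duty not driving under the v1 assumptions.")] ]

-- ===== PORT B =====
-- inner loop 'for key in counts: if key in tags: counts[key] += 1' (keys never change during it)
def pvBump (d : PySem.Dict String Int) (tags : List String) : PySem.Dict String Int :=
  d.keys.foldl (fun d' k => if tags.contains k then d'.modify k 0 (· + 1) else d') d

-- the check(label, status, detail) row constructor
def pvCheck (label status detail : String) : List (String × String) :=
  [("label", label), ("status", status), ("detail", detail)]

def build_review_checks_py_alt (schedule : List (List (String × List String))) : List (List (String × String)) :=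
  let counts := schedule.foldl (fun d seg => pvBump d (pvGetTags seg))
    (PySem.Dict.mk [("cycle_restart", (0 : Int)), ("break", 0), ("fuel", 0)])
  [ pvCheck "Hours of Service Integrity" "pass"
      "Schedule is generated within the v1 property-carrying HOS assumptions.",
    pvCheck "Required Breaks" "pass"
      "30-minute non-driving periods are inserted after cumulative driving limits.",
    pvCheck "Fuel Cadence" "pass"
      (PySem.Int.toStr (counts.getD "fuel" 0) ++ " fuel stop(s) inserted with a 1,000-mile maximum interval."),
    pvCheck "Cycle Availability" "pass"
      (if counts.getD "cycle_restart" 0 ≠ 0 then "34-hour restart inserted." else "No cycle restart required."),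
    pvCheck "Break Source" (if counts.getD "break" 0 ≠ 0 then "pass" else "info")
      "Breaks may be off-duty or on-duty not driving under the v1 assumptions." ]

-- ===== PRECONDITION & SPEC =====
def Spec_build_review_checks_py (schedule : List (List (String × List String))) (out : List (List (String × String))) : Prop := out = build_review_checks_py_alt schedule
instance (schedule : List (List (String × List String))) (out : List (List (String × String))) : Decidable (Spec_build_review_checks_py schedule out) := by unfold Spec_build_review_checks_py; infer_instance

-- ===== CLAIM (what is proved, stated in full; the proofs are below) =====
def Claim_equal_build_review_checks_py : Prop := ∀ (schedule : List (List (String × List String))), Dom_build_review_checks_py schedule → Spec_build_review_checks_py schedule (build_review_checks_py schedule)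

-- ===== LEMMAS AND PROOFS =====
def pvKeys : List String := ["cycle_restart", "break", "fuel"]

theorem pvStep_keys (e : PySem.Dict String Int) (he : e.keys = pvKeys) (k : String)
    (hkm : k ∈ pvKeys) (c : Bool) (f : Int → Int) :
    (if c then e.modify k 0 f else e).keys = pvKeys := by
  split_ifs with hc
  · rw [PySem.Dict.keys_modify, PySem.Dict.keys_insert_of_contains, he]
    exact (PySem.Dict.contains_iff_mem_keys e k).mpr (he ▸ hkm)
  · exact he

theorem pvBump_keys (d : PySem.Dict String Int) (hk : d.keys = pvKeys) (tags : List String) :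
    (pvBump d tags).keys = pvKeys := by
  unfold pvBump
  rw [hk]
  simp only [pvKeys, List.foldl_cons, List.foldl_nil]
  refine pvStep_keys _ ?_ _ (by simp [pvKeys]) _ _
  refine pvStep_keys _ ?_ _ (by simp [pvKeys]) _ _
  exact pvStep_keys _ hk _ (by simp [pvKeys]) _ _

theorem pvBump_getD (d : PySem.Dict String Int) (hk : d.keys = pvKeys) (tags : List String)
    (k : String) (hkm : k ∈ pvKeys) :
    (pvBump d tags).getD k 0 = d.getD k 0 + (if tags.contains k then 1 else 0) := by
  unfold pvBump
  rw [hk]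
  simp only [pvKeys, List.foldl_cons, List.foldl_nil]
  simp only [pvKeys, List.mem_cons, List.not_mem_nil, or_false] at hkm
  rcases hkm with h | h | h
  all_goals subst h
  all_goals split_ifs with h1 h2 h3 <;> simp_all [PySem.Dict.getD_modify]

theorem pvTally_getD (k : String) (hkm : k ∈ pvKeys) (l : List (List (String × List String)))
    (d : PySem.Dict String Int) (hk : d.keys = pvKeys) :
    (l.foldl (fun d seg => pvBump d (pvGetTags seg)) d).getD k 0 =
      d.getD k 0 + ((l.filter (fun seg => (pvGetTags seg).contains k)).length : Int) := by
  induction l generalizing d with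
  | nil => simp
  | cons seg rest ih =>
    rw [List.foldl_cons, ih _ (pvBump_keys _ hk _), pvBump_getD _ hk _ _ hkm, List.filter_cons]
    by_cases h : k ∈ pvGetTags seg <;> simp [h] <;> omega

theorem any_eq_filter_length_ne (l : List (List (String × List String)))
    (p : List (String × List String) → Bool) :
    l.any p = decide (((l.filter p).length : Int) ≠ 0) := by
  by_cases h : l.any p
  · have hex : ∃ x ∈ l, p x := by simpa [List.any_eq_true] using h
    obtain ⟨x, hx, hpx⟩ := hex
    simp [h]
    exact ⟨x, hx, hpx⟩
  · simp [h]
    exact fun a ha => Bool.eq_false_iff.mpr fun hp => h (List.any_eq_true.mpr ⟨a, ha, hp⟩)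

-- ===== VERDICT (by name: the statement is the Claim_ definition above) =====
theorem build_review_checks_py_spec : Claim_equal_build_review_checks_py := by
  intro schedule _
  unfold Spec_build_review_checks_py build_review_checks_py build_review_checks_py_alt
  have hk0 : (PySem.Dict.mk [("cycle_restart", (0 : Int)), ("break", 0), ("fuel", 0)]).keys = pvKeys := by
    simp [PySem.Dict.keys, pvKeys]
  have hR := pvTally_getD "cycle_restart" (by simp [pvKeys]) schedule _ hk0
  have hB := pvTally_getD "break" (by simp [pvKeys]) schedule _ hk0
  have hF := pvTally_getD "fuel" (by simp [pvKeys]) schedule _ hk0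
  simp only [pvCheck]
  rw [hR, hB, hF]
  rw [any_eq_filter_length_ne _ (fun seg => (pvGetTags seg).contains "cycle_restart"),
      any_eq_filter_length_ne _ (fun seg => (pvGetTags seg).contains "break")]
  simp [PySem.Dict.getD, PySem.Dict.get?]
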